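-- pv_equiv track=rewrite | github.com/trishtr/schema_mapper | src/app/services/embedding/config/contextual_descriptions.py | _detect_value_pattern
-- ===== SOURCE A (Python) =====
-- from typing import Dict, List, Any, Optional
--
-- def _detect_value_pattern(
--     sample_values: List[str]
-- ) -> Optional[str]:
--     """Detect pattern in sample values."""
--     if not sample_values:
--         return None
--
--     # Convert to strings
--     values = [str(v) for v in sample_values if v]
--     if not values:
--         return None
--
--     # Check common patterns
--     first_value = values[0]
--
--     if all(v.isdigit() for v in values):
--         return "numeric_sequence"
--     elif all(len(v) == len(first_value) for v in values):
--         return f"fixed_length_{len(first_value)}"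
--     elif all("@" in v for v in values):
--         return "email_address"
--     elif all(v.startswith(("P", "PAT")) for v in values):
--         return "patient_identifier"
--     elif all(v.startswith(("DR", "DOC")) for v in values):
--         return "provider_identifier"
--     elif all("-" in v and len(v.split("-")) == 3 for v in values):
--         return "date_format"
--
--     return None
-- ===== SOURCE B (Python) =====
-- from typing import List, Optional
--
-- def _detect_value_pattern(
--     sample_values: List[str]
-- ) -> Optional[str]:
--     """Detect pattern in sample values (single-pass flag accumulation)."""
--     if not sample_values:
--         return None
--
--     values = [str(v) for v in sample_values if v]
--     if not values:
--         return None
--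
--     first_len = len(values[0])
--     f_num = f_fix = f_em = f_pat = f_doc = f_date = True
--     for v in values:
--         f_num = f_num and v.isdigit()
--         f_fix = f_fix and len(v) == first_len
--         f_em = f_em and "@" in v
--         f_pat = f_pat and v.startswith(("P", "PAT"))
--         f_doc = f_doc and v.startswith(("DR", "DOC"))
--         f_date = f_date and "-" in v and len(v.split("-")) == 3
--
--     if f_num:
--         return "numeric_sequence"
--     if f_fix:
--         return f"fixed_length_{first_len}"
--     if f_em:
--         return "email_address"
--     if f_pat:
--         return "patient_identifier"
--     if f_doc:
--         return "provider_identifier"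
--     if f_date:
--         return "date_format"
--     return None
-- ===== Notes on version B (the rewrite author's own statement) =====
-- stated objective: alternative
-- what changed: Replaces A's six separate short-circuiting all(...) scans over the values with one pass that accumulates six boolean flags, then picks the pattern from the flags in A's priority order.
import Mathlib
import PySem

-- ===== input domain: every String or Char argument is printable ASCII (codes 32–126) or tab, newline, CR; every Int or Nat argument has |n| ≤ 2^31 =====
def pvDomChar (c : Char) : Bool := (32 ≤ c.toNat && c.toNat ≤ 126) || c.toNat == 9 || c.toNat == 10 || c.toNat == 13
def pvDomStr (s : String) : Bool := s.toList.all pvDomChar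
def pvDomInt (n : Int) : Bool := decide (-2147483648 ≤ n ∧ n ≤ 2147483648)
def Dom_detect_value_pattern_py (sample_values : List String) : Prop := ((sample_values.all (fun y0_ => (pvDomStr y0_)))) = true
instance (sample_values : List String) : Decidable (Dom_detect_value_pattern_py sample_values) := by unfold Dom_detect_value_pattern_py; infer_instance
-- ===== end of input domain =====

-- B replaces A's six separate all(...) scans with one flag-accumulating pass (alternative decomposition, same cost class).

-- ===== PORT A =====
def detect_value_pattern_py (sample_values : List String) : Option String :=
  if sample_values = [] then none
  else
    -- values = [str(v) for v in sample_values if v]; str on a str is the identity, truthiness = nonempty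
    let values := sample_values.filter (fun v => !(v == ""))
    if values = [] then none
    else
      let first_value := values.headD ""   -- values[0]; values is nonempty here
      if values.all (fun v => PySem.Str.strIsdigit v) then some "numeric_sequence"
      else if values.all (fun v => PySem.Str.len v == PySem.Str.len first_value) then
        some ("fixed_length_" ++ PySem.Int.toStr ((PySem.Str.len first_value : Int)))
      else if values.all (fun v => PySem.Str.isIn "@" v) then some "email_address"
      else if values.all (fun v => PySem.Str.startswith v "P" || PySem.Str.startswith v "PAT") then
        some "patient_identifier"
      else if values.all (fun v => PySem.Str.startswith v "DR" || PySem.Str.startswith v "DOC") then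
        some "provider_identifier"
      else if values.all (fun v => PySem.Str.isIn "-" v && ((PySem.Chars.splitOn v.toList ['-']).length == 3)) then
        some "date_format"
      else none

-- ===== PORT B =====
def detect_value_pattern_py_alt (sample_values : List String) : Option String :=
  if sample_values = [] then none
  else
    let values := sample_values.filter (fun v => !(v == ""))
    if values = [] then none
    else
      let firstLen := PySem.Str.len (values.headD "")
      let flags := values.foldl
        (fun (s : Bool × Bool × Bool × Bool × Bool × Bool) v =>
          (s.1 && PySem.Str.strIsdigit v,
           s.2.1 && (PySem.Str.len v == firstLen),
           s.2.2.1 && PySem.Str.isIn "@" v,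
           s.2.2.2.1 && (PySem.Str.startswith v "P" || PySem.Str.startswith v "PAT"),
           s.2.2.2.2.1 && (PySem.Str.startswith v "DR" || PySem.Str.startswith v "DOC"),
           s.2.2.2.2.2 && (PySem.Str.isIn "-" v && ((PySem.Chars.splitOn v.toList ['-']).length == 3))))
        (true, true, true, true, true, true)
      if flags.1 then some "numeric_sequence"
      else if flags.2.1 then some ("fixed_length_" ++ PySem.Int.toStr ((firstLen : Int)))
      else if flags.2.2.1 then some "email_address"
      else if flags.2.2.2.1 then some "patient_identifier"
      else if flags.2.2.2.2.1 then some "provider_identifier"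
      else if flags.2.2.2.2.2 then some "date_format"
      else none

-- ===== PRECONDITION & SPEC =====
def Spec_detect_value_pattern_py (sample_values : List String) (out : Option String) : Prop := out = detect_value_pattern_py_alt sample_values
instance (sample_values : List String) (out : Option String) : Decidable (Spec_detect_value_pattern_py sample_values out) := by unfold Spec_detect_value_pattern_py; infer_instance

-- ===== CLAIM (what is proved, stated in full; the proofs are below) =====
def Claim_equal_detect_value_pattern_py : Prop := ∀ (sample_values : List String), Dom_detect_value_pattern_py sample_values → Spec_detect_value_pattern_py sample_values (detect_value_pattern_py sample_values)

-- ===== LEMMAS AND PROOFS =====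

-- B's single flag loop computes the six all-scans of A at once.
theorem flags_foldl_eq (p1 p2 p3 p4 p5 p6 : String → Bool) (l : List String)
    (s : Bool × Bool × Bool × Bool × Bool × Bool) :
    l.foldl (fun (s : Bool × Bool × Bool × Bool × Bool × Bool) v =>
        (s.1 && p1 v, s.2.1 && p2 v, s.2.2.1 && p3 v, s.2.2.2.1 && p4 v,
         s.2.2.2.2.1 && p5 v, s.2.2.2.2.2 && p6 v)) s
      = (s.1 && l.all p1, s.2.1 && l.all p2, s.2.2.1 && l.all p3,
         s.2.2.2.1 && l.all p4, s.2.2.2.2.1 && l.all p5, s.2.2.2.2.2 && l.all p6) := by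
  induction l generalizing s with
  | nil => simp
  | cons x xs ih =>
      simp only [List.foldl_cons, ih, List.all_cons, Bool.and_assoc]

-- ===== VERDICT (by name: the statement is the Claim_ definition above) =====
theorem detect_value_pattern_py_spec : Claim_equal_detect_value_pattern_py := by
  intro sv _
  unfold Spec_detect_value_pattern_py detect_value_pattern_py detect_value_pattern_py_alt
  simp only [flags_foldl_eq, Bool.true_and]
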